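-- pv_equiv track=rewrite | github.com/LeeJuOh/coding-test | greedy/baekjoon/competition_or_intern.py | my_solution
-- ===== SOURCE A (Python) =====
-- def my_solution(n, m, k):
--     while k > 0:
--         if n >= 2 * m:
--             n -= 1
--         else:
--             m -= 1
--         k -= 1
--     return min(n // 2, m)
-- ===== SOURCE B (Python) =====
-- def my_solution(n, m, k):
--     # O(1): closed-form phases instead of stepping k times.
--     if k > 0:
--         d = n - 2 * m
--         # m-phase: decrement m until n >= 2*m (each step raises n - 2*m by 2)
--         t1 = min(k, (1 - d) // 2) if d < 0 else 0
--         m -= t1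
--         k -= t1
--         # n-phase: decrement n until n < 2*m
--         t2 = min(k, n - 2 * m + 1) if k > 0 else 0
--         n -= t2
--         k -= t2
--         if k > 0:
--             # steady 3-cycle from n == 2*m - 1: m-1, n-1, n-1
--             q, r = divmod(k, 3)
--             m -= q
--             n -= 2 * q
--             if r >= 1:
--                 m -= 1
--             if r == 2:
--                 n -= 1
--     return min(n // 2, m)
-- ===== Notes on version B (the rewrite author's own statement) =====
-- stated objective: faster
-- what changed: A steps the (n,m) state one unit per iteration for k iterations; B computes the final state in closed form via three phases (m-decrement phase, n-decrement phase, then a steady 3-step cycle handled with divmod by 3).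
import Mathlib
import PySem

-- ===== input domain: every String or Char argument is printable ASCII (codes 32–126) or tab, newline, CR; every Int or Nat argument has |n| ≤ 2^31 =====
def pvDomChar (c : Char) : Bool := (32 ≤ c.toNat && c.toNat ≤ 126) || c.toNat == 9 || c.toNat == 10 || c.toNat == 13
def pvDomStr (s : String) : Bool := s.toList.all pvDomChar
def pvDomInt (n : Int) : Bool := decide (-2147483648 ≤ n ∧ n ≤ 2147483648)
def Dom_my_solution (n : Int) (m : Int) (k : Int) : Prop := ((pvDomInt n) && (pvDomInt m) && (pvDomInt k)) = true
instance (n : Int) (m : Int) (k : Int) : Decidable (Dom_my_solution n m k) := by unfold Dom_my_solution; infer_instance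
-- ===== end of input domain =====

-- B replaces A's step-by-step loop (k iterations) by a three-phase closed form (m-phase, n-phase, steady 3-cycle).

-- ===== PORT A =====
-- the while-loop of A, fueled by k.toNat (the loop body runs exactly k times when k > 0)
def pvLoopA : Int → Int → Nat → Int × Int
  | n, m, 0 => (n, m)
  | n, m, (f+1) => if n ≥ 2*m then pvLoopA (n-1) m f else pvLoopA n (m-1) f

def my_solution (n : Int) (m : Int) (k : Int) : Int :=
  let p := pvLoopA n m k.toNat
  min (PySem.Int.floordiv p.1 2) p.2

-- ===== PORT B =====
-- closed-form phases of Source B: (final n, final m)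
def pvCoreB (n : Int) (m : Int) (k : Int) : Int × Int :=
  if k > 0 then
    let d := n - 2*m
    let t1 := if d < 0 then min k (PySem.Int.floordiv (1 - d) 2) else 0
    let m1 := m - t1
    let k1 := k - t1
    let t2 := if k1 > 0 then min k1 (n - 2*m1 + 1) else 0
    let n1 := n - t2
    let k2 := k1 - t2
    if k2 > 0 then
      let q := PySem.Int.floordiv k2 3
      let r := PySem.Int.mod k2 3
      let m2 := m1 - q
      let n2 := n1 - 2*q
      let m3 := if r ≥ 1 then m2 - 1 else m2
      let n3 := if r = 2 then n2 - 1 else n2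
      (n3, m3)
    else (n1, m1)
  else (n, m)

def my_solution_alt (n : Int) (m : Int) (k : Int) : Int :=
  let p := pvCoreB n m k
  min (PySem.Int.floordiv p.1 2) p.2

-- ===== PRECONDITION & SPEC =====
def Spec_my_solution (n : Int) (m : Int) (k : Int) (out : Int) : Prop := out = my_solution_alt n m k
instance (n : Int) (m : Int) (k : Int) (out : Int) : Decidable (Spec_my_solution n m k out) := by unfold Spec_my_solution; infer_instance

-- ===== CLAIM (what is proved, stated in full; the proofs are below) =====
def Claim_equal_my_solution : Prop := ∀ (n : Int) (m : Int) (k : Int), Dom_my_solution n m k → Spec_my_solution n m k (my_solution n m k)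

-- ===== LEMMAS AND PROOFS =====

theorem pvLoopA_succ (n m : Int) (f : Nat) :
    pvLoopA n m (f+1) = if n ≥ 2*m then pvLoopA (n-1) m f else pvLoopA n (m-1) f := by
  simp only [pvLoopA]

-- m-phase: while n < 2*m, each iteration decrements m
theorem pvLoopA_mphase (t : Nat) : ∀ (f : Nat) (n m : Int), t ≤ f → 2*(t:Int) ≤ 2*m - n + 1 →
    pvLoopA n m f = pvLoopA n (m - t) (f - t) := by
  induction t with
  | zero => intro f n m _ _; simp
  | succ t ih =>
    intro f n m htf hbd
    obtain ⟨f', rfl⟩ : ∃ f', f = f' + 1 := ⟨f - 1, by omega⟩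
    rw [pvLoopA_succ, if_neg (by push_cast at hbd ⊢; omega)]
    rw [ih f' n (m-1) (by omega) (by push_cast at hbd ⊢; omega)]
    congr 1
    · push_cast; ring
    · omega

-- n-phase: while n ≥ 2*m, each iteration decrements n
theorem pvLoopA_nphase (t : Nat) : ∀ (f : Nat) (n m : Int), t ≤ f → (t:Int) ≤ n - 2*m + 1 →
    pvLoopA n m f = pvLoopA (n - t) m (f - t) := by
  induction t with
  | zero => intro f n m _ _; simp
  | succ t ih =>
    intro f n m htf hbd
    obtain ⟨f', rfl⟩ : ∃ f', f = f' + 1 := ⟨f - 1, by omega⟩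
    rw [pvLoopA_succ, if_pos (by push_cast at hbd ⊢; omega)]
    rw [ih f' (n-1) m (by omega) (by push_cast at hbd ⊢; omega)]
    congr 1
    · push_cast; ring
    · omega

-- steady cycle: from n = 2*m - 1, three iterations give n = 2*(m-1) - 1
theorem pvLoopA_cyc (c : Nat) : ∀ (m : Int) (j : Nat),
    pvLoopA (2*m-1) m (3*c+j) = pvLoopA (2*(m-c)-1) (m-c) j := by
  induction c with
  | zero => intro m j; norm_num
  | succ c ih =>
    intro m j
    rw [show 3*(c+1)+j = ((3*c+j)+1+1)+1 by omega]
    rw [pvLoopA_succ, if_neg (by omega)]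
    rw [pvLoopA_succ, if_pos (by omega)]
    rw [pvLoopA_succ, if_pos (by omega)]
    rw [show (2*m-1-1-1 : Int) = 2*(m-1)-1 by ring]
    rw [ih (m-1) j]
    congr 1
    · push_cast; ring
    · push_cast; ring

-- cycle tail with the remainder j < 3 evaluated
theorem pvLoopA_tail (m : Int) (q j : Nat) (hj : j < 3) :
    pvLoopA (2*m-1) m (3*q+j) =
      ((if j = 2 then 2*(m-q)-1-1 else 2*(m-q)-1), (if 1 ≤ j then m-q-1 else m-q)) := by
  rw [pvLoopA_cyc]
  interval_cases j
  · simp [pvLoopA]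
  · rw [show (1:Nat) = 0+1 from rfl, pvLoopA_succ, if_neg (by omega)]
    simp [pvLoopA]
  · rw [show (2:Nat) = (0+1)+1 from rfl, pvLoopA_succ, if_neg (by omega),
      pvLoopA_succ, if_pos (by omega)]
    simp [pvLoopA]

-- the loop equals the closed form
theorem pvLoopA_eq_core (f : Nat) (n m : Int) : pvLoopA n m f = pvCoreB n m (f:Int) := by
  rcases Nat.eq_zero_or_pos f with rfl | hfpos
  · simp [pvLoopA, pvCoreB]
  have hf : (1:Int) ≤ (f:Int) := by exact_mod_cast hfpos
  unfold pvCoreB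
  simp only [PySem.Int.floordiv_eq_ediv_of_pos (show (0:Int) < 2 by norm_num),
    PySem.Int.floordiv_eq_ediv_of_pos (show (0:Int) < 3 by norm_num),
    PySem.Int.mod_eq_emod_of_pos (show (0:Int) < 3 by norm_num)]
  rw [if_pos (show (f:Int) > 0 by omega)]
  by_cases hd : n - 2*m < 0
  · rw [if_pos hd]
    by_cases hb : (f:Int) ≤ (1 - (n - 2*m)) / 2
    · -- all fuel spent in the m-phase
      rw [min_eq_left hb,
        if_neg (show ¬((f:Int) - (f:Int) > 0) by omega),
        if_neg (show ¬((f:Int) - (f:Int) - 0 > 0) by omega)]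
      rw [pvLoopA_mphase f f n m le_rfl (by omega)]
      simp [pvLoopA]
    · -- m-phase completes with fuel left
      have ht1pos : 1 ≤ (1 - (n - 2*m)) / 2 := by omega
      set t1 : Int := (1 - (n - 2*m)) / 2 with ht1
      have ht1n : ((t1.toNat : Nat) : Int) = t1 := Int.toNat_of_nonneg (by omega)
      rw [min_eq_right (by omega : t1 ≤ (f:Int)),
        if_pos (show (f:Int) - t1 > 0 by omega)]
      rw [pvLoopA_mphase t1.toNat f n m (by omega) (by rw [ht1n]; omega)]
      rw [ht1n]
      have hd2 : 0 ≤ n - 2*(m - t1) ∧ n - 2*(m - t1) ≤ 1 := by constructor <;> omega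
      by_cases hc : (f:Int) - t1 ≤ n - 2*(m - t1) + 1
      · -- rest of the fuel spent in the n-phase
        rw [min_eq_left hc,
          if_neg (show ¬((f:Int) - t1 - ((f:Int) - t1) > 0) by omega)]
        have hfn : ((f - t1.toNat : Nat) : Int) = (f:Int) - t1 := by omega
        rw [pvLoopA_nphase (f - t1.toNat) (f - t1.toNat) n (m - t1) le_rfl (by omega)]
        simp only [Nat.sub_self, pvLoopA, hfn]
      · -- n-phase completes; steady cycle on the rest
        set d2 : Int := n - 2*(m - t1) with hd2e
        rw [min_eq_right (by omega : d2 + 1 ≤ (f:Int) - t1),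
          if_pos (show (f:Int) - t1 - (d2 + 1) > 0 by omega)]
        rw [pvLoopA_nphase (d2+1).toNat (f - t1.toNat) n (m - t1) (by omega) (by omega)]
        rw [show n - ((d2+1).toNat : Int) = 2*(m - t1) - 1 by omega]
        set f3 : Nat := f - t1.toNat - (d2+1).toNat with hf3
        have hf3i : (f3 : Int) = (f:Int) - t1 - (d2+1) := by omega
        rw [show f3 = 3*(f3/3) + f3%3 from by omega]
        rw [pvLoopA_tail (m - t1) (f3/3) (f3%3) (by omega)]
        have hq : ((f3/3 : Nat) : Int) = ((f:Int) - t1 - (d2+1)) / 3 := by omega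
        have hr : ((f3%3 : Nat) : Int) = ((f:Int) - t1 - (d2+1)) % 3 := by omega
        split_ifs <;> simp only [Prod.mk.injEq] <;> constructor <;> omega
  · -- no m-phase: n ≥ 2*m from the start
    rw [if_neg hd]
    simp only [sub_zero]
    by_cases he : (f:Int) ≤ n - 2*m + 1
    · -- all fuel spent in the n-phase
      rw [if_pos (show (f:Int) > 0 by omega), min_eq_left he,
        if_neg (show ¬((f:Int) - (f:Int) > 0) by omega)]
      rw [pvLoopA_nphase f f n m le_rfl (by omega)]
      simp [pvLoopA]
    · -- n-phase completes; steady cycle on the rest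
      set d : Int := n - 2*m with hde
      have hd0 : 0 ≤ d := by omega
      rw [if_pos (show (f:Int) > 0 by omega),
        min_eq_right (by omega : d + 1 ≤ (f:Int)),
        if_pos (show (f:Int) - (d + 1) > 0 by omega)]
      rw [pvLoopA_nphase (d+1).toNat f n m (by omega) (by omega)]
      rw [show n - ((d+1).toNat : Int) = 2*m - 1 by omega]
      set f3 : Nat := f - (d+1).toNat with hf3
      have hf3i : (f3 : Int) = (f:Int) - (d+1) := by omega
      rw [show f3 = 3*(f3/3) + f3%3 from by omega]
      rw [pvLoopA_tail m (f3/3) (f3%3) (by omega)]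
      have hq : ((f3/3 : Nat) : Int) = ((f:Int) - (d+1)) / 3 := by omega
      have hr : ((f3%3 : Nat) : Int) = ((f:Int) - (d+1)) % 3 := by omega
      split_ifs <;> simp only [Prod.mk.injEq] <;> constructor <;> omega

-- ===== VERDICT (by name: the statement is the Claim_ definition above) =====
theorem my_solution_spec : Claim_equal_my_solution := by
  intro n m k _
  unfold Spec_my_solution my_solution my_solution_alt
  rcases (by omega : k ≤ 0 ∨ 0 < k) with hk | hk
  · have h1 : k.toNat = 0 := Int.toNat_of_nonpos hk
    have h2 : pvCoreB n m k = (n, m) := by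
      unfold pvCoreB
      rw [if_neg (by omega)]
    rw [h1, h2]
    rfl
  · have h : ((k.toNat : Nat) : Int) = k := Int.toNat_of_nonneg hk.le
    rw [pvLoopA_eq_core, h]
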